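-- pv_equiv track=rewrite | github.com/neeraj-yadav-hub/python-programming-practice | p14_prefix_sum_even_array.py | create_even_prefix_sum
-- ===== SOURCE A (Python) =====
-- def create_even_prefix_sum(given_array):
--     prefix_sum = [None]*len(given_array)
--     for i in range(0,len(given_array)):
--         if i == 0:
--             prefix_sum[i] = given_array[i]
--         elif i%2 == 0:
--             prefix_sum[i] = prefix_sum[i - 1] + given_array[i]
--         else:
--             prefix_sum[i] = prefix_sum[i-1]
--     return prefix_sum
-- ===== SOURCE B (Python) =====
-- def create_even_prefix_sum(given_array):
--     # Two-at-a-time index walk: one running sum over even positions,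
--     # each iteration emits the value once (or twice when an odd slot follows).
--     out = []
--     run = 0
--     n = len(given_array)
--     i = 0
--     while i < n:
--         run = run + given_array[i]
--         out.append(run)
--         if i + 1 < n:
--             out.append(run)
--         i += 2
--     return out
-- ===== Notes on version B (the rewrite author's own statement) =====
-- stated objective: alternative
-- what changed: Replaces the per-index loop with even/odd parity branches and prefix_sum[i-1] back-indexing by a two-at-a-time index walk keeping one running sum and emitting it once or twice per step.
import Mathlib
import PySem

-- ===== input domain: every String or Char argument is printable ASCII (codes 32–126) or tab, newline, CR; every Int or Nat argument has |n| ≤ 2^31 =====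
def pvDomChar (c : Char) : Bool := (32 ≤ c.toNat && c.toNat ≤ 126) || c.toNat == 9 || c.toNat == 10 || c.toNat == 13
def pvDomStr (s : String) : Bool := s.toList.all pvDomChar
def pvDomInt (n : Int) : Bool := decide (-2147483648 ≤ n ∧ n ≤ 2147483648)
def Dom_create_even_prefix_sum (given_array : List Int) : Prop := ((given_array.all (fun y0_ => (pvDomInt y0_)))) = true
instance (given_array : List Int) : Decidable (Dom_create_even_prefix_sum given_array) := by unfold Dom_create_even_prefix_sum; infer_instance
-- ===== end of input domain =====

-- B replaces A's per-index parity branches and back-indexing by a two-at-a-time walk with one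
-- running sum (objective: alternative decomposition, same O(n) cost).

-- ===== PORT A =====
-- prefix_sum starts as [None]*n but every slot is written (in order) before being read (only
-- slot i-1 is read), so the port keeps the written prefix as a List Int grown by appends;
-- prefix_sum[i-1] is the element at index i-1 of that prefix, read with pyGetD.
def create_even_prefix_sum (given_array : List Int) : List Int :=
  (PySem.List.pyRange 0 given_array.length 1).foldl
    (fun prefix_sum i =>
      if i = 0 then
        prefix_sum ++ [PySem.List.pyGetD given_array i 0]
      else if PySem.Int.mod i 2 = 0 then
        prefix_sum ++ [PySem.List.pyGetD prefix_sum (i - 1) 0 + PySem.List.pyGetD given_array i 0]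
      else
        prefix_sum ++ [PySem.List.pyGetD prefix_sum (i - 1) 0]) []

-- ===== PORT B =====
-- the while loop of Source B: i steps by 2; run accumulates given_array[i]; out is appended to.
def altGo (xs : List Int) (n : Nat) (i : Nat) (run : Int) (out : List Int) : List Int :=
  if _h : i < n then
    let run' := run + xs.getD i 0
    altGo xs n (i + 2) run' (if i + 1 < n then out ++ [run', run'] else out ++ [run'])
  else out
termination_by n - i

def create_even_prefix_sum_alt (given_array : List Int) : List Int :=
  altGo given_array given_array.length 0 0 []

-- ===== PRECONDITION & SPEC =====
def Spec_create_even_prefix_sum (given_array : List Int) (out : List Int) : Prop := out = create_even_prefix_sum_alt given_array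
instance (given_array : List Int) (out : List Int) : Decidable (Spec_create_even_prefix_sum given_array out) := by unfold Spec_create_even_prefix_sum; infer_instance

-- ===== CLAIM (what is proved, stated in full; the proofs are below) =====
def Claim_equal_create_even_prefix_sum : Prop := ∀ (given_array : List Int), Dom_create_even_prefix_sum given_array → Spec_create_even_prefix_sum given_array (create_even_prefix_sum given_array)

-- ===== LEMMAS AND PROOFS =====

-- reference value: F xs i = sum of xs[2k] for 2k ≤ i (A's prefix_sum[i])
def pvF (xs : List Int) : Nat → Int
  | 0 => xs.getD 0 0
  | i + 1 => if (i + 1) % 2 = 0 then pvF xs i + xs.getD (i + 1) 0 else pvF xs i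

theorem pvF_cons_cons (x y : Int) (r : List Int) (j : Nat) :
    pvF (x :: y :: r) (j + 2) = x + pvF r j := by
  induction j with
  | zero => simp [pvF]
  | succ j ih =>
    have e : j + 1 + 2 = (j + 2) + 1 := by omega
    rw [e, pvF, ih]
    have hg : (x :: y :: r).getD (j + 2 + 1) 0 = r.getD (j + 1) 0 := by simp [List.getD]
    have hpar : (j + 2 + 1) % 2 = (j + 1) % 2 := by omega
    rw [hg, hpar]
    by_cases hp : (j + 1) % 2 = 0
    · simp [pvF, hp]
      ring
    · simp [pvF, hp]

theorem pvMod_natCast (k : Nat) : PySem.Int.mod (k : Int) 2 = ((k % 2 : Nat) : Int) := by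
  show ((k : Int)).fmod 2 = _
  rw [Int.fmod_eq_emod_of_nonneg _ (by norm_num)]
  omega

theorem foldA_eq (xs : List Int) (k : Nat) (hk : k ≤ xs.length) :
    (PySem.List.pyRange 0 (k : Int) 1).foldl
      (fun prefix_sum i =>
        if i = 0 then
          prefix_sum ++ [PySem.List.pyGetD xs i 0]
        else if PySem.Int.mod i 2 = 0 then
          prefix_sum ++ [PySem.List.pyGetD prefix_sum (i - 1) 0 + PySem.List.pyGetD xs i 0]
        else
          prefix_sum ++ [PySem.List.pyGetD prefix_sum (i - 1) 0]) []
    = (List.range k).map (pvF xs) := by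
  induction k with
  | zero => simp [PySem.List.pyRange]
  | succ k ih =>
    have hk' : k ≤ xs.length := Nat.le_of_succ_le hk
    have hr : PySem.List.pyRange 0 ((k : Int) + 1) 1
        = PySem.List.pyRange 0 (k : Int) 1 ++ [(k : Int)] :=
      PySem.List.pyRange_one_succ_right (by positivity)
    have hcast : (((k + 1 : Nat)) : Int) = (k : Int) + 1 := by push_cast; ring
    rw [hcast, hr, List.foldl_append, ih hk']
    simp only [List.foldl]
    by_cases h0 : k = 0
    · subst h0
      simp [List.range_succ, pvF, PySem.List.pyGetD_zero, List.getD]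
    · have hne : ((k : Int)) ≠ 0 := by exact_mod_cast h0
      have hk1 : ((k : Int)) - 1 = ((k - 1 : Nat) : Int) := by
        have : 1 ≤ k := Nat.one_le_iff_ne_zero.mpr h0
        push_cast [this]; ring
      have hgetprev :
          PySem.List.pyGetD ((List.range k).map (pvF xs)) ((k : Int) - 1) 0 = pvF xs (k - 1) := by
        rw [hk1, PySem.List.pyGetD_natCast]
        have hlt : k - 1 < k := by omega
        simp [List.getD, hlt]
      have hksucc : k = (k - 1) + 1 := by omega
      by_cases hp : k % 2 = 0
      · have hm : PySem.Int.mod (k : Int) 2 = 0 := by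
          rw [pvMod_natCast, hp]; rfl
        rw [if_neg hne, if_pos hm, hgetprev, PySem.List.pyGetD_natCast]
        rw [List.range_succ, List.map_append]
        have : pvF xs k = pvF xs (k - 1) + xs.getD k 0 := by
          conv_lhs => rw [hksucc]
          rw [pvF]
          rw [← hksucc]
          simp [hp]
        simp [this]
      · have hm : PySem.Int.mod (k : Int) 2 ≠ 0 := by
          rw [pvMod_natCast]
          have : k % 2 = 1 := by omega
          rw [this]; decide
        rw [if_neg hne, if_neg hm, hgetprev]
        rw [List.range_succ, List.map_append]
        have : pvF xs k = pvF xs (k - 1) := by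
          conv_lhs => rw [hksucc]
          rw [pvF]
          rw [← hksucc]
          have : k % 2 = 1 := by omega
          simp [this]
        simp [this]

theorem drop_getD (xs : List Int) (i j : Nat) : (xs.drop i).getD j 0 = xs.getD (i + j) 0 := by
  simp [List.getD, List.getElem?_drop]

theorem altGo_eq (xs : List Int) (k : Nat) :
    ∀ (i : Nat) (run : Int) (out : List Int), xs.length - i = k → i ≤ xs.length →
    altGo xs xs.length i run out
      = out ++ (List.range k).map (fun j => run + pvF (xs.drop i) j) := by
  induction k using Nat.strong_induction_on with
  | _ k ih =>
    intro i run out hk hi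
    by_cases h : i < xs.length
    · rw [altGo]
      simp only [h, dif_pos]
      have hx0 : (xs.drop i).getD 0 0 = xs.getD i 0 := by rw [drop_getD, Nat.add_zero]
      by_cases h1 : i + 1 < xs.length
      · -- two elements emitted
        have hk2 : 2 ≤ k := by omega
        have hdecomp : xs.drop i = xs[i] :: xs[i+1] :: xs.drop (i + 2) := by
          rw [List.drop_eq_getElem_cons h]
          congr 1
          rw [List.drop_eq_getElem_cons h1]
        have hcall := ih (k - 2) (by omega) (i + 2) (run + xs.getD i 0)
          (out ++ [run + xs.getD i 0, run + xs.getD i 0]) (by omega) (by omega)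
        simp only [h1, if_pos]
        rw [hcall]
        have hrange : List.range k = 0 :: 1 :: (List.range (k - 2)).map (fun j => j + 2) := by
          have : k = (k - 2) + 1 + 1 := by omega
          rw [this, List.range_succ_eq_map, List.range_succ_eq_map]
          simp [List.map_map, Function.comp_def]
        rw [hrange]
        have hgi : xs.getD i 0 = xs[i] := by simp [List.getD, h]
        have hF0 : pvF (xs.drop i) 0 = xs.getD i 0 := hx0
        have hF1 : pvF (xs.drop i) 1 = xs.getD i 0 := by
          show (if (0 + 1) % 2 = 0 then pvF (xs.drop i) 0 + (xs.drop i).getD (0 + 1) 0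
                else pvF (xs.drop i) 0) = _
          rw [if_neg (by omega)]
          exact hx0
        have hF2 : ∀ j, pvF (xs.drop i) (j + 2) = xs[i] + pvF (xs.drop (i + 2)) j := by
          intro j; rw [hdecomp, pvF_cons_cons]
        simp only [List.map_cons, List.map_map, Function.comp_def, hF2, hF0, hF1, hgi]
        have hre : ∀ j : Nat, run + xs[i] + pvF (xs.drop (i + 2)) j
            = run + (xs[i] + pvF (xs.drop (i + 2)) j) := fun j => by ring
        simp [hre, List.append_assoc]
      · -- last single element: i + 1 = length, k = 1
        have hk1 : k = 1 := by omega
        have hstop : ¬ (i + 2 < xs.length) := by omega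
        simp only [h1]
        rw [altGo]
        simp only [hstop, dif_neg, not_false_iff]
        have hF0 : pvF (xs.drop i) 0 = xs.getD i 0 := hx0
        rw [hk1]
        simp [hF0]
    · have hk0 : k = 0 := by omega
      rw [altGo]
      simp [h, hk0]

-- ===== VERDICT (by name: the statement is the Claim_ definition above) =====
theorem create_even_prefix_sum_spec : Claim_equal_create_even_prefix_sum := by
  intro xs _
  unfold Spec_create_even_prefix_sum create_even_prefix_sum create_even_prefix_sum_alt
  rw [foldA_eq xs xs.length le_rfl]
  rw [altGo_eq xs xs.length 0 0 [] (by omega) (by omega)]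
  simp
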